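-- pv_equiv track=rewrite | github.com/chris-khan-1/advent-of-code-public | src/aoc_2015/day_20/aoc_2015_20_solution.py | get_new_lowest_house_number_given_total_presents
-- ===== SOURCE A (Python) =====
-- def get_factors(n: int) -> set[int]:
--     factors = set()
--     for i in range(1, int(n**0.5) + 1):
--         if n % i == 0:
--             factors.add(i)
--             factors.add(n // i)
--     return factors
--
-- def get_new_lowest_house_number_given_total_presents(total_presents: int) -> int:
--     house_number = 1
--     present_count = 0
--     while present_count < total_presents:
--         present_count = 11 * sum(
--             [i for i in get_factors(n=house_number) if house_number <= i * 50]
--         )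
--         house_number += 1
--     return house_number - 1
-- ===== SOURCE B (Python) =====
-- def get_new_lowest_house_number_given_total_presents(total_presents: int) -> int:
--     house = 0
--     presents = 0
--     while presents < total_presents:
--         house += 1
--         presents = 11 * sum(house // j for j in range(1, 51) if house % j == 0)
--     return house
-- ===== Notes on version B (the rewrite author's own statement) =====
-- stated objective: faster
-- what changed: Instead of factorising each house by trial division up to sqrt(house) into a set and filtering for divisors i with house <= 50*i, B computes each house's presents directly as 11 * sum of house//j over the fixed range j=1..50 with j | house (the co-divisor form of the same condition), so no factorisation, set or sqrt is needed.
import Mathlib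
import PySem

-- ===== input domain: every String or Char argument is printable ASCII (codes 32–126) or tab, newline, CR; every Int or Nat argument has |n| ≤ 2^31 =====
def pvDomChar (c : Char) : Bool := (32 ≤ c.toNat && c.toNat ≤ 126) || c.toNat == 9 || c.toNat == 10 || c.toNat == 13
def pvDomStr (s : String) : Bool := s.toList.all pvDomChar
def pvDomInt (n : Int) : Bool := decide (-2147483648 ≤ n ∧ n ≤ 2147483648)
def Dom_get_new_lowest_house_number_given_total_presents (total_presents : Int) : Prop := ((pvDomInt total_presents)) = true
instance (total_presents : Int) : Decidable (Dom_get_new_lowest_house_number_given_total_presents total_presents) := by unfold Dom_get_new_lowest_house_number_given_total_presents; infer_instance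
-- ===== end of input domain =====

-- B replaces per-house trial division up to sqrt(house) (building a set of factors) by the
-- direct sum of house//j over the fixed co-divisors j = 1..50 dividing house; measured faster.
-- The fuel arguments only make the Python while-loops total; they are large enough to never run out.

-- ===== PORT A =====
-- int(n**0.5) is ported as Nat.sqrt: exact for the arguments reached here (house numbers,
-- positive and far below 2^52, where Python's float sqrt truncation equals isqrt).
def get_factors (n : Int) : PySem.Set Int :=
  (PySem.List.pyRange 1 ((Nat.sqrt n.toNat : Int) + 1) 1).foldl
    (fun factors i =>
      if PySem.Int.mod n i = 0 then
        PySem.Set.add (PySem.Set.add factors i) (PySem.Int.floordiv n i)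
      else factors)
    PySem.Set.empty

def loopA (total : Int) : Nat → Int → Int → Int
  | 0, house, _ => house - 1
  | fuel + 1, house, pc =>
      if pc < total then
        loopA total fuel (house + 1)
          (11 * (((get_factors house).filter (fun i => decide (house ≤ i * 50))).sum))
      else house - 1

def get_new_lowest_house_number_given_total_presents (total_presents : Int) : Int :=
  loopA total_presents (total_presents.toNat + 2) 1 0

-- ===== PORT B =====
def presentsB (house : Int) : Int :=
  11 * ((PySem.List.pyRange 1 51 1).foldl
    (fun acc j => if PySem.Int.mod house j = 0 then acc + PySem.Int.floordiv house j else acc) 0)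

def loopB (total : Int) : Nat → Int → Int → Int
  | 0, house, _ => house
  | fuel + 1, house, pc =>
      if pc < total then loopB total fuel (house + 1) (presentsB (house + 1))
      else house

def get_new_lowest_house_number_given_total_presents_alt (total_presents : Int) : Int :=
  loopB total_presents (total_presents.toNat + 2) 0 0

-- ===== PRECONDITION & SPEC =====
def Spec_get_new_lowest_house_number_given_total_presents (total_presents : Int) (out : Int) : Prop := out = get_new_lowest_house_number_given_total_presents_alt total_presents
instance (total_presents : Int) (out : Int) : Decidable (Spec_get_new_lowest_house_number_given_total_presents total_presents out) := by unfold Spec_get_new_lowest_house_number_given_total_presents; infer_instance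

-- ===== CLAIM (what is proved, stated in full; the proofs are below) =====
def Claim_equal_get_new_lowest_house_number_given_total_presents : Prop := ∀ (total_presents : Int), Dom_get_new_lowest_house_number_given_total_presents total_presents → Spec_get_new_lowest_house_number_given_total_presents total_presents (get_new_lowest_house_number_given_total_presents total_presents)

-- ===== LEMMAS AND PROOFS =====

-- membership in A's factor-collecting fold
theorem mem_factors_fold (n : Int) (l : List Int) (s : PySem.Set Int) (y : Int) :
    y ∈ l.foldl
      (fun factors i =>
        if PySem.Int.mod n i = 0 then
          PySem.Set.add (PySem.Set.add factors i) (PySem.Int.floordiv n i)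
        else factors) s
    ↔ y ∈ s ∨ ∃ i ∈ l, PySem.Int.mod n i = 0 ∧ (y = i ∨ y = PySem.Int.floordiv n i) := by
  induction l generalizing s with
  | nil => simp
  | cons a t ih =>
    simp only [List.foldl_cons]
    by_cases h : PySem.Int.mod n a = 0
    · rw [if_pos h, ih]
      simp only [PySem.Set.mem_add, List.mem_cons]
      constructor
      · rintro (((hy | hy) | hy) | ⟨i, hi, hm2, hy⟩)
        · exact Or.inl hy
        · exact Or.inr ⟨a, Or.inl rfl, h, Or.inl hy⟩
        · exact Or.inr ⟨a, Or.inl rfl, h, Or.inr hy⟩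
        · exact Or.inr ⟨i, Or.inr hi, hm2, hy⟩
      · rintro (hy | ⟨i, rfl | hi, hm2, hy⟩)
        · exact Or.inl (Or.inl (Or.inl hy))
        · rcases hy with hy | hy
          · exact Or.inl (Or.inl (Or.inr hy))
          · exact Or.inl (Or.inr hy)
        · exact Or.inr ⟨i, hi, hm2, hy⟩
    · rw [if_neg h, ih]
      simp [h]

-- A's factor-collecting fold preserves Nodup
theorem nodup_factors_fold (n : Int) (l : List Int) (s : PySem.Set Int) (hs : s.Nodup) :
    (l.foldl
      (fun factors i =>
        if PySem.Int.mod n i = 0 then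
          PySem.Set.add (PySem.Set.add factors i) (PySem.Int.floordiv n i)
        else factors) s).Nodup := by
  induction l generalizing s with
  | nil => exact hs
  | cons a t ih =>
    simp only [List.foldl_cons]
    by_cases h : PySem.Int.mod n a = 0
    · rw [if_pos h]
      exact ih _ (PySem.Set.nodup_add _ _ (PySem.Set.nodup_add _ _ hs))
    · rw [if_neg h]; exact ih _ hs

theorem nodup_get_factors (n : Int) : (get_factors n).Nodup :=
  nodup_factors_fold n _ _ List.nodup_nil

-- membership in get_factors ↑m, m ≥ 1: exactly the (positive) divisors of m
theorem mem_get_factors (m : Nat) (hm : 1 ≤ m) (y : Int) :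
    y ∈ get_factors (m : Int) ↔ ∃ d ∈ m.divisors, y = (d : Int) := by
  unfold get_factors
  rw [mem_factors_fold]
  simp only [PySem.Set.empty, List.not_mem_nil, false_or]
  have htn : ((m : Int)).toNat = m := Int.toNat_natCast m
  rw [htn]
  constructor
  · rintro ⟨i, hi, hmod, hy⟩
    rw [PySem.List.mem_pyRange_one] at hi
    obtain ⟨hi1, hi2⟩ := hi
    have hipos : 0 < i := by omega
    have hdvd : i ∣ (m : Int) := (PySem.Int.mod_eq_zero_iff_dvd _ _).mp hmod
    have hieq : i = ((i.toNat : Nat) : Int) := (Int.toNat_of_nonneg (by omega)).symm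
    have hdvdN : i.toNat ∣ m := by
      rw [hieq] at hdvd
      exact_mod_cast hdvd
    rcases hy with hy | hy
    · exact ⟨i.toNat, Nat.mem_divisors.mpr ⟨hdvdN, by omega⟩, by rw [hy, ← hieq]⟩
    · refine ⟨m / i.toNat, Nat.mem_divisors.mpr ⟨Nat.div_dvd_of_dvd hdvdN, by omega⟩, ?_⟩
      rw [hy, hieq, PySem.Int.floordiv_natCast]
      simp
  · rintro ⟨d, hd, rfl⟩
    obtain ⟨hdvd, -⟩ := Nat.mem_divisors.mp hd
    have hdpos : 0 < d := Nat.pos_of_mem_divisors hd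
    have hdle : d ≤ m := Nat.le_of_dvd (by omega) hdvd
    by_cases hsq : d ≤ Nat.sqrt m
    · refine ⟨(d : Int), ?_, ?_, Or.inl rfl⟩
      · rw [PySem.List.mem_pyRange_one]
        constructor <;> [exact_mod_cast hdpos; exact_mod_cast Nat.lt_succ_of_le hsq]
      · exact (PySem.Int.mod_eq_zero_iff_dvd _ _).mpr (by exact_mod_cast hdvd)
    · -- d > sqrt m: d is recovered as m // (m / d)
      push Not at hsq
      set e := m / d with he
      have hedvd : e ∣ m := Nat.div_dvd_of_dvd hdvd
      have hepos : 0 < e := Nat.div_pos hdle (by omega)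
      have hesq : e ≤ Nat.sqrt m := by
        by_contra hc
        push Not at hc
        have h1 : Nat.sqrt m + 1 ≤ d := hsq
        have h2 : Nat.sqrt m + 1 ≤ e := hc
        have h3 : m < (Nat.sqrt m + 1) * (Nat.sqrt m + 1) := Nat.lt_succ_sqrt m
        have h4 : d * e = m := by
          rw [he, Nat.mul_div_cancel' hdvd]
        nlinarith
      refine ⟨(e : Int), ?_, ?_, Or.inr ?_⟩
      · rw [PySem.List.mem_pyRange_one]
        constructor <;> [exact_mod_cast hepos; exact_mod_cast Nat.lt_succ_of_le hesq]
      · exact (PySem.Int.mod_eq_zero_iff_dvd _ _).mpr (by exact_mod_cast hedvd)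
      · rw [PySem.Int.floordiv_natCast, he, Nat.div_div_self hdvd (by omega)]

-- sum of a Nodup Int list as a Finset sum
theorem sum_toFinset_of_nodup (l : List Int) (h : l.Nodup) :
    ∑ x ∈ l.toFinset, x = l.sum := by
  induction l with
  | nil => simp
  | cons a t ih =>
    rw [List.toFinset_cons, Finset.sum_insert (by simpa using (List.nodup_cons.mp h).1),
      List.sum_cons, ih (List.nodup_cons.mp h).2]

-- A's per-house sum, as a sum over the Nat divisors
theorem sumA_eq (m : Nat) (hm : 1 ≤ m) :
    (((get_factors (m : Int)).filter (fun i => decide ((m : Int) ≤ i * 50))).sum)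
      = ∑ d ∈ m.divisors, (if m ≤ 50 * d then (d : Int) else 0) := by
  have hnd : ((get_factors (m : Int)).filter (fun i => decide ((m : Int) ≤ i * 50))).Nodup :=
    (nodup_get_factors _).filter _
  rw [← sum_toFinset_of_nodup _ hnd]
  have himg : ((get_factors (m : Int)).filter (fun i => decide ((m : Int) ≤ i * 50))).toFinset
      = (m.divisors.filter (fun d => m ≤ 50 * d)).image (fun d : Nat => (d : Int)) := by
    ext x
    simp only [List.mem_toFinset, List.mem_filter, Finset.mem_image, Finset.mem_filter,
      decide_eq_true_eq, mem_get_factors m hm]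
    constructor
    · rintro ⟨⟨d, hd, rfl⟩, hle⟩
      exact ⟨d, ⟨hd, by have := hle; push_cast at this; omega⟩, rfl⟩
    · rintro ⟨d, ⟨hd, hle⟩, rfl⟩
      exact ⟨⟨d, hd, rfl⟩, by push_cast; omega⟩
  rw [himg, Finset.sum_image (by intro a _ b _ hab; exact Nat.cast_injective (by simpa using hab)),
    Finset.sum_filter]

-- turn B's conditional fold into a list sum
theorem foldB_eq_sum (m : Nat) (l : List Int) (a : Int) :
    l.foldl (fun acc j => if PySem.Int.mod (m : Int) j = 0 then acc + PySem.Int.floordiv (m : Int) j else acc) a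
      = a + (l.map (fun j => if PySem.Int.mod (m : Int) j = 0 then PySem.Int.floordiv (m : Int) j else 0)).sum := by
  have : (fun (acc j : Int) => if PySem.Int.mod (m : Int) j = 0 then acc + PySem.Int.floordiv (m : Int) j else acc)
      = fun acc j => acc + (if PySem.Int.mod (m : Int) j = 0 then PySem.Int.floordiv (m : Int) j else 0) := by
    funext acc j; split <;> simp
  rw [this, PySem.List.foldl_add]

-- a mapped range sum as a Finset.range sum
theorem sum_map_range (n : Nat) (F : Nat → Int) :
    ((List.range n).map F).sum = ∑ k ∈ Finset.range n, F k := by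
  induction n with
  | zero => simp
  | succ n ih => rw [List.range_succ, Finset.sum_range_succ, List.map_append, List.sum_append, ih]; simp

-- B's per-house sum, as a sum over the Nat divisors
theorem sumB_eq (m : Nat) (hm : 1 ≤ m) :
    ((PySem.List.pyRange 1 51 1).foldl
      (fun acc j => if PySem.Int.mod (m : Int) j = 0 then acc + PySem.Int.floordiv (m : Int) j else acc) 0)
      = ∑ d ∈ m.divisors, (if d ≤ 50 then ((m / d : Nat) : Int) else 0) := by
  rw [foldB_eq_sum, zero_add, PySem.List.pyRange_one]
  have h51 : ((51 : Int) - 1).toNat = 50 := by decide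
  rw [h51, List.map_map, sum_map_range 50]
  have hstep : ∀ k ∈ Finset.range 50,
      ((fun j => if PySem.Int.mod (m : Int) j = 0 then PySem.Int.floordiv (m : Int) j else 0) ∘
        (fun k : Nat => (1 : Int) + (k : Int))) k
      = (fun k : Nat => if (k + 1) ∣ m then ((m / (k + 1) : Nat) : Int) else 0) k := by
    intro k _
    simp only [Function.comp]
    have h1 : (1 : Int) + (k : Int) = ((k + 1 : Nat) : Int) := by push_cast; ring
    rw [h1, PySem.Int.floordiv_natCast]
    by_cases hd : (k + 1) ∣ m
    · rw [if_pos ((PySem.Int.mod_eq_zero_iff_dvd _ _).mpr (by exact_mod_cast hd)), if_pos hd]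
    · rw [if_neg (fun hc => hd (by exact_mod_cast (PySem.Int.mod_eq_zero_iff_dvd _ _).mp hc)), if_neg hd]
  rw [Finset.sum_congr rfl hstep]
  -- reindex range 50 ↦ Icc 1 50, then restrict to divisors
  have hIcc : ∑ k ∈ Finset.range 50, (if (k + 1) ∣ m then ((m / (k + 1) : Nat) : Int) else 0)
      = ∑ j ∈ Finset.Icc 1 50, (if j ∣ m then ((m / j : Nat) : Int) else 0) := by
    rw [show Finset.Icc 1 50 = Finset.Ico 1 51 by rfl, Finset.sum_Ico_eq_sum_range]
    exact Finset.sum_congr (by norm_num) (fun k _ => by rw [Nat.add_comm 1 k])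
  rw [hIcc, ← Finset.sum_filter]
  have hset : (Finset.Icc 1 50).filter (fun j => j ∣ m)
      = m.divisors.filter (fun d => d ≤ 50) := by
    ext j
    simp only [Finset.mem_filter, Finset.mem_Icc, Nat.mem_divisors]
    constructor
    · rintro ⟨⟨h1, h2⟩, h3⟩; exact ⟨⟨h3, by omega⟩, h2⟩
    · rintro ⟨⟨h1, h2⟩, h3⟩
      have : 0 < j := by
        rcases Nat.eq_zero_or_pos j with rfl | h
        · obtain rfl : m = 0 := Nat.eq_zero_of_zero_dvd h1; omega
        · exact h
      exact ⟨⟨by omega, h3⟩, h1⟩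
  rw [hset, Finset.sum_filter]

-- the two divisor sums agree (the i ↦ m / i involution on divisors)
theorem divisor_sums_eq (m : Nat) (hm : 1 ≤ m) :
    (∑ d ∈ m.divisors, (if m ≤ 50 * d then (d : Int) else 0))
      = ∑ d ∈ m.divisors, (if d ≤ 50 then ((m / d : Nat) : Int) else 0) := by
  rw [← Nat.sum_div_divisors m (fun d => if d ≤ 50 then ((m / d : Nat) : Int) else 0)]
  refine Finset.sum_congr rfl ?_
  intro d hd
  obtain ⟨hdvd, -⟩ := Nat.mem_divisors.mp hd
  have hdpos : 0 < d := Nat.pos_of_mem_divisors hd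
  have hdds : m / (m / d) = d := Nat.div_div_self hdvd (by omega)
  have hiff : m / d ≤ 50 ↔ m ≤ 50 * d := by
    constructor
    · intro h
      have := Nat.div_mul_cancel hdvd
      calc m = m / d * d := this.symm
        _ ≤ 50 * d := Nat.mul_le_mul_right d h
    · intro h
      have h2 : m / d ≤ 50 * d / d := Nat.div_le_div_right h
      rwa [Nat.mul_div_cancel 50 hdpos] at h2
  by_cases hc : m ≤ 50 * d
  · rw [if_pos hc, if_pos (hiff.mpr hc), hdds]
  · rw [if_neg hc, if_neg (fun h => hc (hiff.mp h))]

-- the per-house present counts of A and B coincide for every house ≥ 1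
theorem presents_eq (house : Int) (h1 : 1 ≤ house) :
    11 * (((get_factors house).filter (fun i => decide (house ≤ i * 50))).sum)
      = presentsB house := by
  obtain ⟨m, rfl⟩ : ∃ m : Nat, house = (m : Int) :=
    ⟨house.toNat, (Int.toNat_of_nonneg (by omega)).symm⟩
  have hm : 1 ≤ m := by exact_mod_cast h1
  unfold presentsB
  rw [sumA_eq m hm, sumB_eq m hm, divisor_sums_eq m hm]

-- the two loops agree (B's house counter trails A's by one)
theorem loop_eq (total : Int) (fuel : Nat) :
    ∀ house pc, 1 ≤ house → loopA total fuel house pc = loopB total fuel (house - 1) pc := by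
  induction fuel with
  | zero => intro house pc _; rfl
  | succ fuel ih =>
    intro house pc h1
    simp only [loopA, loopB]
    by_cases hlt : pc < total
    · rw [if_pos hlt, if_pos hlt]
      have : house - 1 + 1 = house := by ring
      rw [this, ← presents_eq house h1]
      have := ih (house + 1) (11 * (((get_factors house).filter (fun i => decide (house ≤ i * 50))).sum)) (by omega)
      simpa using this
    · rw [if_neg hlt, if_neg hlt]

-- ===== VERDICT (by name: the statement is the Claim_ definition above) =====
theorem get_new_lowest_house_number_given_total_presents_spec : Claim_equal_get_new_lowest_house_number_given_total_presents := by
  intro total _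
  unfold Spec_get_new_lowest_house_number_given_total_presents
  unfold get_new_lowest_house_number_given_total_presents get_new_lowest_house_number_given_total_presents_alt
  have := loop_eq total (total.toNat + 2) 1 0 (by omega)
  simpa using this
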